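-- pv_equiv track=rewrite | github.com/universe-engine-ai/serenissima | backend/il-testimone/consciousness_measurement_implementation.py | _find_priority_shifts
-- ===== SOURCE A (Python) =====
-- def _find_priority_shifts(activities):
--     """Find shifts in priority"""
--     # Simplified: type changes indicate priority shifts
--     shifts = []
--     prev_type = None
--     for act in sorted(activities, key=lambda x: x.get('CreatedAt', '')):
--         curr_type = act.get('Type')
--         if prev_type and curr_type != prev_type:
--             shifts.append(act)
--         prev_type = curr_type
--     return shifts
-- ===== SOURCE B (Python) =====
-- def _find_priority_shifts(activities):
--     """Find shifts in priority (run-boundary formulation)."""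
--     ordered = sorted(activities, key=lambda x: x.get('CreatedAt', ''))
--     # Phase 1: collapse the ordered sequence into maximal runs of equal Type.
--     runs = []
--     for act in ordered:
--         t = act.get('Type')
--         if runs and runs[-1][0] == t:
--             runs[-1][1].append(act)
--         else:
--             runs.append((t, [act]))
--     # Phase 2: a shift is the first activity of each run whose predecessor run
--     # has a truthy key (None/'' suppress it, like A's `if prev_type`).
--     shifts = []
--     for (prev_key, _), (_, group) in zip(runs, runs[1:]):
--         if prev_key:
--             shifts.append(group[0])
--     return shifts
-- ===== Notes on version B (the rewrite author's own statement) =====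
-- stated objective: alternative
-- what changed: Replaces A's per-element comparison state machine with a two-phase pipeline: first collapse the sorted sequence into maximal runs of equal Type, then emit the head of every run whose predecessor run has a truthy key.
import Mathlib
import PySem

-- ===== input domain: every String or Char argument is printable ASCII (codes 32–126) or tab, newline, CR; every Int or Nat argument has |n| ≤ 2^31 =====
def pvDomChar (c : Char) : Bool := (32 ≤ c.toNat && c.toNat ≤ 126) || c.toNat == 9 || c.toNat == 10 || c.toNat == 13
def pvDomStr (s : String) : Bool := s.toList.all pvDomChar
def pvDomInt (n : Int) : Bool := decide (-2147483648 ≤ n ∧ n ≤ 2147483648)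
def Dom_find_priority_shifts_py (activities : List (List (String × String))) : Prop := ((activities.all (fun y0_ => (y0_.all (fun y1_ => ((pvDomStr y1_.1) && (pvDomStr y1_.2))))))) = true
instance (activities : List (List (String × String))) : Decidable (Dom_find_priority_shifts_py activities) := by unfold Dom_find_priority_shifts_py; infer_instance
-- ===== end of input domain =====

-- B replaces A's per-element previous-type state machine with a two-phase
-- run-boundary formulation (build maximal equal-Type runs, then emit run heads);
-- same cost, different structure.

-- dict.get(k) on an association list: first match (shared lookup primitive)
def dictGet (d : List (String × String)) (k : String) : Option String :=
  (d.find? (fun p => p.1 == k)).map Prod.snd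

-- Python truthiness of an Optional[str]
def truthyS : Option String → Bool
  | none => false
  | some s => !(s == "")

-- ===== PORT A =====
def find_priority_shifts_py (activities : List (List (String × String))) : List (List (String × String)) :=
  ((PySem.List.sorted activities (fun x => (dictGet x "CreatedAt").getD "") false).foldl
    (fun (st : List (List (String × String)) × Option String) act =>
      let curr := dictGet act "Type"
      (if truthyS st.2 && !(curr == st.2) then st.1 ++ [act] else st.1, curr))
    ([], none)).1

-- ===== PORT B =====
-- `if runs and runs[-1][0] == t: runs[-1][1].append(act) else: runs.append((t,[act]))`
def pvPushRun (rs : List (Option String × List (List (String × String))))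
    (t : Option String) (act : List (String × String)) :
    List (Option String × List (List (String × String))) :=
  match rs with
  | [] => [(t, [act])]
  | [(k, g)] => if k == t then [(k, g ++ [act])] else [(k, g), (t, [act])]
  | r :: rest => r :: pvPushRun rest t act

def find_priority_shifts_py_alt (activities : List (List (String × String))) : List (List (String × String)) :=
  let ordered := PySem.List.sorted activities (fun x => (dictGet x "CreatedAt").getD "") false
  let runs := ordered.foldl (fun rs act => pvPushRun rs (dictGet act "Type") act) []
  (runs.zip runs.tail).foldl
    (fun acc pc => if truthyS pc.1.1 then acc ++ [pc.2.2.headD []] else acc) []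

-- ===== PRECONDITION & SPEC =====
def Spec_find_priority_shifts_py (activities : List (List (String × String))) (out : List (List (String × String))) : Prop := out = find_priority_shifts_py_alt activities
instance (activities : List (List (String × String))) (out : List (List (String × String))) : Decidable (Spec_find_priority_shifts_py activities out) := by unfold Spec_find_priority_shifts_py; infer_instance

-- ===== CLAIM (what is proved, stated in full; the proofs are below) =====
def Claim_equal_find_priority_shifts_py : Prop := ∀ (activities : List (List (String × String))), Dom_find_priority_shifts_py activities → Spec_find_priority_shifts_py activities (find_priority_shifts_py activities)

-- ===== LEMMAS AND PROOFS =====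

-- A's scan, written as structural recursion on the ordered list
def pvShiftsA : Option String → List (List (String × String)) → List (List (String × String))
  | _, [] => []
  | prev, a :: rest =>
      (if truthyS prev && !((dictGet a "Type") == prev) then [a] else []) ++
        pvShiftsA (dictGet a "Type") rest

-- B's boundary scan, as a function of the run list
def pvZipShifts (rs : List (Option String × List (List (String × String)))) : List (List (String × String)) :=
  (rs.zip rs.tail).foldl
    (fun acc pc => if truthyS pc.1.1 then acc ++ [pc.2.2.headD []] else acc) []

def pvLastKey (rs : List (Option String × List (List (String × String)))) : Option String :=
  match rs.getLast? with
  | none => none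
  | some r => r.1

def pvGN (rs : List (Option String × List (List (String × String)))) : Prop :=
  ∀ p ∈ rs, p.2 ≠ []

theorem pvFoldlA (xs : List (List (String × String)))
    (acc : List (List (String × String))) (prev : Option String) :
    (xs.foldl
      (fun (st : List (List (String × String)) × Option String) act =>
        let curr := dictGet act "Type"
        (if truthyS st.2 && !(curr == st.2) then st.1 ++ [act] else st.1, curr))
      (acc, prev)).1 = acc ++ pvShiftsA prev xs := by
  induction xs generalizing acc prev with
  | nil => simp [pvShiftsA]
  | cons a rest ih =>
      simp only [List.foldl_cons, pvShiftsA]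
      rw [ih]
      split_ifs <;> simp

theorem pvPushRun_cons₂ (r r' : Option String × List (List (String × String)))
    (rest : List (Option String × List (List (String × String))))
    (t : Option String) (act : List (String × String)) :
    pvPushRun (r :: r' :: rest) t act = r :: pvPushRun (r' :: rest) t act := rfl

theorem pvPushRun_concat (rs : List (Option String × List (List (String × String))))
    (k t : Option String) (g : List (List (String × String))) (act : List (String × String)) :
    pvPushRun (rs ++ [(k, g)]) t act =
      if k == t then rs ++ [(k, g ++ [act])] else rs ++ [(k, g), (t, [act])] := by
  induction rs with
  | nil => simp [pvPushRun]
  | cons r rest ih =>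
      cases rest with
      | nil =>
          simp only [List.cons_append, List.nil_append, pvPushRun_cons₂, pvPushRun]
          split_ifs <;> rfl
      | cons r' rest' =>
          simp only [List.cons_append] at ih ⊢
          rw [pvPushRun_cons₂, ih]
          split_ifs <;> rfl

theorem pvZipShifts_acc (ps : List ((Option String × List (List (String × String))) × (Option String × List (List (String × String))))) (acc : List (List (String × String))) :
    ps.foldl (fun acc pc => if truthyS pc.1.1 then acc ++ [pc.2.2.headD []] else acc) acc
      = acc ++ ps.foldl (fun acc pc => if truthyS pc.1.1 then acc ++ [pc.2.2.headD []] else acc) [] := by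
  induction ps generalizing acc with
  | nil => simp
  | cons p ps ih =>
      simp only [List.foldl_cons]
      rw [ih, ih (if truthyS p.1.1 then [] ++ [p.2.2.headD []] else [])]
      split_ifs <;> simp

theorem pvZipShifts_cons₂ (x y : Option String × List (List (String × String)))
    (rest : List (Option String × List (List (String × String)))) :
    pvZipShifts (x :: y :: rest) =
      (if truthyS x.1 then [y.2.headD []] else []) ++ pvZipShifts (y :: rest) := by
  simp only [pvZipShifts, List.zip, List.tail, List.zipWith, List.foldl_cons]
  rw [pvZipShifts_acc]
  split_ifs <;> simp

theorem pvZipShifts_concat (rs : List (Option String × List (List (String × String))))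
    (r : Option String × List (List (String × String))) :
    pvZipShifts (rs ++ [r]) =
      pvZipShifts rs ++ (if truthyS (pvLastKey rs) then [r.2.headD []] else []) := by
  induction rs with
  | nil => simp [pvZipShifts, pvLastKey, truthyS]
  | cons x rest ih =>
      cases rest with
      | nil => simp [pvZipShifts, pvLastKey, List.zip]
      | cons y rest' =>
          simp only [List.cons_append] at ih ⊢
          rw [pvZipShifts_cons₂, pvZipShifts_cons₂ x y rest', ih]
          have hl : pvLastKey (x :: y :: rest') = pvLastKey (y :: rest') := by
            simp [pvLastKey]
          rw [hl, List.append_assoc]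

theorem pvMain (xs : List (List (String × String)))
    (rs : List (Option String × List (List (String × String)))) (hgn : pvGN rs) :
    pvZipShifts (xs.foldl (fun rs act => pvPushRun rs (dictGet act "Type") act) rs)
      = pvZipShifts rs ++ pvShiftsA (pvLastKey rs) xs := by
  induction xs generalizing rs with
  | nil => simp [pvShiftsA]
  | cons a rest ih =>
      simp only [List.foldl_cons, pvShiftsA]
      rcases List.eq_nil_or_concat rs with h0 | ⟨rs', ⟨k, g⟩, h0⟩
      · subst h0
        rw [ih _ (by intro p hp; simp [pvPushRun] at hp; subst hp; simp)]
        simp [pvPushRun, pvZipShifts, pvLastKey, truthyS]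
      · simp only [List.concat_eq_append] at h0
        subst h0
        rw [pvPushRun_concat]
        have hgne : g ≠ [] := hgn (k, g) (by simp)
        obtain ⟨x0, g0, rfl⟩ : ∃ x0 g0, g = x0 :: g0 := by
          cases g with
          | nil => exact absurd rfl hgne
          | cons x0 g0 => exact ⟨x0, g0, rfl⟩
        have hlast : pvLastKey (rs' ++ [(k, x0 :: g0)]) = k := by simp [pvLastKey]
        by_cases hkt : (k == (dictGet a "Type")) = true
        · rw [if_pos hkt]
          rw [ih _ (by
            intro p hp
            rcases List.mem_append.1 hp with h1 | h1
            · exact hgn p (List.mem_append.2 (Or.inl h1))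
            · simp at h1; subst h1; simp)]
          have hk : k = dictGet a "Type" := by simpa using hkt
          have hlast2 : pvLastKey (rs' ++ [(k, (x0 :: g0) ++ [a])]) = k := by simp [pvLastKey]
          rw [hlast2, hlast, ← hk]
          rw [pvZipShifts_concat, pvZipShifts_concat]
          simp
        · rw [if_neg hkt]
          have hrw : rs' ++ [(k, x0 :: g0), (dictGet a "Type", [a])]
              = (rs' ++ [(k, x0 :: g0)]) ++ [(dictGet a "Type", [a])] := by simp
          rw [hrw]
          rw [ih _ (by
            intro p hp
            rcases List.mem_append.1 hp with h1 | h1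
            · exact hgn p h1
            · simp at h1; subst h1; simp)]
          have hlast3 : pvLastKey ((rs' ++ [(k, x0 :: g0)]) ++ [(dictGet a "Type", [a])]) = dictGet a "Type" := by
            simp [pvLastKey]
          rw [hlast3, hlast]
          rw [pvZipShifts_concat, hlast]
          have hne : ((dictGet a "Type") == k) = false := by
            cases hbe : (dictGet a "Type") == k
            · rfl
            · exact absurd (by simpa using (beq_iff_eq.1 hbe).symm) (by simpa using hkt)
          simp [hne]

-- ===== VERDICT (by name: the statement is the Claim_ definition above) =====
theorem find_priority_shifts_py_spec : Claim_equal_find_priority_shifts_py := by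
  intro activities _
  unfold Spec_find_priority_shifts_py
  have hB : find_priority_shifts_py_alt activities
      = pvZipShifts ((PySem.List.sorted activities (fun x => (dictGet x "CreatedAt").getD "") false).foldl
          (fun rs act => pvPushRun rs (dictGet act "Type") act) []) := rfl
  have hA : find_priority_shifts_py activities
      = pvShiftsA none (PySem.List.sorted activities (fun x => (dictGet x "CreatedAt").getD "") false) := by
    unfold find_priority_shifts_py
    rw [pvFoldlA]
    simp
  rw [hA, hB, pvMain _ [] (by intro p hp; simp at hp)]
  simp [pvZipShifts, pvLastKey]
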